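-- pv_equiv track=rewrite | github.com/uptonking/power-context | scripts/rerank_query.py | derive_vector_name
-- ===== SOURCE A (Python) =====
-- def derive_vector_name(model_name: str) -> str:
--     name = model_name.strip().lower()
--     if "bge-base-en-v1.5" in name:
--         return "fast-bge-base-en-v1.5"
--     if "minilm" in name:
--         return "fast-all-minilm-l6-v2"
--     # fallback sanitize
--     for ch in ["/", ".", " ", "_"]:
--         name = name.replace(ch, "-")
--     while "--" in name:
--         name = name.replace("--", "-")
--     return name
-- ===== SOURCE B (Python) =====
-- def derive_vector_name(model_name: str) -> str:
--     name = model_name.strip().lower()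
--     if "bge-base-en-v1.5" in name:
--         return "fast-bge-base-en-v1.5"
--     if "minilm" in name:
--         return "fast-all-minilm-l6-v2"
--     # single pass: map separator chars to '-' and collapse dash runs as we go
--     out = []
--     for ch in name:
--         if ch in "/. _-":
--             if not out or out[-1] != "-":
--                 out.append("-")
--         else:
--             out.append(ch)
--     return "".join(out)
-- ===== Notes on version B (the rewrite author's own statement) =====
-- stated objective: alternative
-- what changed: replaced the four full replace passes plus the repeated while-loop collapse of double dashes with one single pass over the characters that maps separators to dashes and skips a dash when the last emitted character is already a dash
import Mathlib
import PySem

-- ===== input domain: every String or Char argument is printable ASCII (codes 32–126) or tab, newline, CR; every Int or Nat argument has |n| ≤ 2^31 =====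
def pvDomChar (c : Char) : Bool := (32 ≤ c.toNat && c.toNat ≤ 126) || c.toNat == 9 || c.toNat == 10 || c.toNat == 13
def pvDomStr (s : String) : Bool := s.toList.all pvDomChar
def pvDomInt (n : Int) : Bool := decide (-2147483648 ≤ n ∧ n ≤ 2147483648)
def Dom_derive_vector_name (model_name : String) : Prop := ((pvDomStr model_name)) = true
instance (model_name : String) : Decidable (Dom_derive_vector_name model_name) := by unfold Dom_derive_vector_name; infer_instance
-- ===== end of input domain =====

-- B replaces A's four replace() passes plus the while-loop "--" collapse by one single
-- left-to-right pass that maps separators to '-' and never emits two dashes in a row.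

-- ===== PORT A =====

-- characterization of one pass of name.replace("--", "-"), used only to justify
-- termination of the while loop below (cited by name in decreasing_by)
def pvRep : List Char → List Char
  | [] => []
  | [c] => [c]
  | a :: b :: t => if a = '-' ∧ b = '-' then '-' :: pvRep t else a :: pvRep (b :: t)

theorem pvRep_go : ∀ (fuel : Nat) (l acc : List Char), l.length ≤ fuel →
    PySem.Chars.replace.go ['-', '-'] ['-'] fuel l acc = acc.reverse ++ pvRep l := by
  intro fuel
  induction fuel with
  | zero =>
    intro l acc h
    have : l = [] := by cases l <;> simp_all
    subst this
    simp [PySem.Chars.replace.go, pvRep]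
  | succ f ih =>
    intro l acc h
    match l with
    | [] => simp [PySem.Chars.replace.go, pvRep]
    | [c] =>
      have hpre : List.isPrefixOf ['-', '-'] [c] = false := by simp [List.isPrefixOf]
      simp only [PySem.Chars.replace.go, hpre, Bool.false_eq_true, if_false]
      rw [ih [] (c :: acc) (by simp)]
      simp [pvRep]
    | c :: d :: t =>
      simp only [List.length_cons] at h
      by_cases hcd : c = '-' ∧ d = '-'
      · obtain ⟨hc, hd⟩ := hcd
        subst hc; subst hd
        have hpre : List.isPrefixOf ['-', '-'] ('-' :: '-' :: t) = true := by
          simp [List.isPrefixOf]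
        simp only [PySem.Chars.replace.go, hpre, if_true]
        rw [show List.drop (['-', '-'] : List Char).length ('-' :: '-' :: t) = t from rfl]
        rw [ih t (['-'].reverse ++ acc) (by omega)]
        simp [pvRep]
      · have hpre : List.isPrefixOf ['-', '-'] (c :: d :: t) = false := by
          simp [List.isPrefixOf]
          intro hc hd
          exact absurd ⟨hc.symm, hd.symm⟩ hcd
        simp only [PySem.Chars.replace.go, hpre, Bool.false_eq_true, if_false]
        rw [ih (d :: t) (c :: acc) (by simp; omega)]
        simp [pvRep, hcd]

theorem pvRep_replace (l : List Char) :
    PySem.Chars.replace l ['-', '-'] ['-'] = pvRep l := by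
  simpa using pvRep_go l.length l [] le_rfl

theorem pvRep_length_le (l : List Char) : (pvRep l).length ≤ l.length := by
  fun_induction pvRep l <;> simp_all <;> omega

theorem pvRep_length_lt (l : List Char) (h : ['-', '-'] <:+: l) :
    (pvRep l).length < l.length := by
  fun_induction pvRep l with
  | case1 => exact absurd h.length_le (by simp)
  | case2 c => exact absurd h.length_le (by simp)
  | case3 a b t hab =>
    have := pvRep_length_le t
    simp
    omega
  | case4 a b t hab ih =>
    rcases List.infix_cons_iff.mp h with hpre | hinf
    · rcases hpre with ⟨r, hr⟩
      simp at hr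
      exact absurd ⟨hr.1.symm, hr.2.1.symm⟩ hab
    · have := ih hinf
      simp at this ⊢
      omega

-- while "--" in name: name = name.replace("--", "-")
def pvCollapseLoop (s : List Char) : List Char :=
  if h : PySem.Chars.isIn ['-', '-'] s = true then
    pvCollapseLoop (PySem.Chars.replace s ['-', '-'] ['-'])
  else s
  termination_by s.length
  decreasing_by
    rw [pvRep_replace]
    exact pvRep_length_lt s ((PySem.Chars.isIn_iff_infix _ _).mp h)

def derive_vector_name (model_name : String) : String :=
  let name := PySem.Str.lower (PySem.Str.strip model_name)
  if PySem.Str.isIn "bge-base-en-v1.5" name then "fast-bge-base-en-v1.5"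
  else if PySem.Str.isIn "minilm" name then "fast-all-minilm-l6-v2"
  else
    -- for ch in ["/", ".", " ", "_"]: name = name.replace(ch, "-")
    let cs := List.foldl (fun s ch => PySem.Chars.replace s [ch] ['-'])
                name.toList ['/', '.', ' ', '_']
    String.ofList (pvCollapseLoop cs)

-- ===== PORT B =====

def derive_vector_name_alt (model_name : String) : String :=
  let name := PySem.Str.lower (PySem.Str.strip model_name)
  if PySem.Str.isIn "bge-base-en-v1.5" name then "fast-bge-base-en-v1.5"
  else if PySem.Str.isIn "minilm" name then "fast-all-minilm-l6-v2"
  else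
    -- out is kept reversed: out[-1] is out.head?; 'not out or out[-1] != "-"' ⟺ head ≠ some '-'
    let out := name.toList.foldl (fun out c =>
      if c = '/' ∨ c = '.' ∨ c = ' ' ∨ c = '_' ∨ c = '-' then
        if out.head? = some '-' then out else '-' :: out
      else c :: out) []
    String.ofList out.reverse

-- ===== PRECONDITION & SPEC =====
def Spec_derive_vector_name (model_name : String) (out : String) : Prop := out = derive_vector_name_alt model_name
instance (model_name : String) (out : String) : Decidable (Spec_derive_vector_name model_name out) := by unfold Spec_derive_vector_name; infer_instance

-- ===== CLAIM (what is proved, stated in full; the proofs are below) =====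
def Claim_equal_derive_vector_name : Prop := ∀ (model_name : String), Dom_derive_vector_name model_name → Spec_derive_vector_name model_name (derive_vector_name model_name)

-- ===== LEMMAS AND PROOFS =====

-- the pointwise effect of the four replace passes
def pvF (c : Char) : Char :=
  if c = '/' then '-' else if c = '.' then '-' else if c = ' ' then '-' else if c = '_' then '-' else c

-- squeeze of dash runs, with a "previous emitted char was a dash" flag
def pvSq : Bool → List Char → List Char
  | _, [] => []
  | prev, c :: t =>
    if c = '-' then (if prev then pvSq true t else '-' :: pvSq true t) else c :: pvSq false t

theorem pvGo1 (a : Char) : ∀ (fuel : Nat) (l acc : List Char), l.length ≤ fuel →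
    PySem.Chars.replace.go [a] ['-'] fuel l acc
      = acc.reverse ++ l.map (fun c => if c = a then '-' else c) := by
  intro fuel
  induction fuel with
  | zero =>
    intro l acc h
    have : l = [] := by cases l <;> simp_all
    subst this
    simp [PySem.Chars.replace.go]
  | succ f ih =>
    intro l acc h
    match l with
    | [] => simp [PySem.Chars.replace.go]
    | c :: t =>
      simp only [List.length_cons] at h
      by_cases hc : c = a
      · subst hc
        have hpre : List.isPrefixOf [c] (c :: t) = true := by simp [List.isPrefixOf]
        simp only [PySem.Chars.replace.go, hpre, if_true]
        rw [show List.drop ([c] : List Char).length (c :: t) = t from rfl]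
        rw [ih t (['-'].reverse ++ acc) (by omega)]
        simp
      · have hpre : List.isPrefixOf [a] (c :: t) = false := by
          simp [List.isPrefixOf]
          exact fun h => absurd h.symm hc
        simp only [PySem.Chars.replace.go, hpre, Bool.false_eq_true, if_false]
        rw [ih t (c :: acc) (by omega)]
        simp [hc]

theorem pvReplace_single (l : List Char) (a : Char) :
    PySem.Chars.replace l [a] ['-'] = l.map (fun c => if c = a then '-' else c) := by
  simpa using pvGo1 a l.length l [] le_rfl

theorem pvMapChain (cs : List Char) :
    List.foldl (fun s ch => PySem.Chars.replace s [ch] ['-']) cs ['/', '.', ' ', '_']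
      = cs.map pvF := by
  simp only [List.foldl_cons, List.foldl_nil, pvReplace_single, List.map_map]
  apply List.map_congr_left
  intro c _
  simp only [Function.comp, pvF]
  by_cases h1 : c = '/' <;> by_cases h2 : c = '.' <;> by_cases h3 : c = ' ' <;>
    by_cases h4 : c = '_' <;> simp_all

theorem pvSq_pvRep (l : List Char) : ∀ b, pvSq b (pvRep l) = pvSq b l := by
  fun_induction pvRep l with
  | case1 => intro b; rfl
  | case2 c => intro b; rfl
  | case3 a b t hab ih =>
    intro fb
    obtain ⟨ha, hb⟩ := hab
    subst ha; subst hb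
    cases fb <;> simp [pvSq, ih]
  | case4 a b t hab ih =>
    intro fb
    by_cases ha : a = '-' <;> simp [pvSq, ha, ih]

theorem pvSq_fix (l : List Char) (h : ¬ (['-', '-'] <:+: l)) :
    pvSq false l = l ∧ (l.head? ≠ some '-' → pvSq true l = l) := by
  induction l with
  | nil => exact ⟨rfl, fun _ => rfl⟩
  | cons c t ih =>
    have ht : ¬ (['-', '-'] <:+: t) := fun hinf => h (hinf.trans (t.suffix_cons c).isInfix)
    constructor
    · by_cases hc : c = '-'
      · subst hc
        have hth : t.head? ≠ some '-' := by
          intro hh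
          rcases t with _ | ⟨d, t'⟩
          · simp at hh
          · simp at hh
            subst hh
            exact h (List.IsPrefix.isInfix ⟨t', rfl⟩)
        simp [pvSq, (ih ht).2 hth]
      · simp [pvSq, hc, (ih ht).1]
    · intro hh
      have hc : c ≠ '-' := by simp at hh; exact hh
      simp [pvSq, hc, (ih ht).1]

theorem pvCollapse_eq (l : List Char) : pvCollapseLoop l = pvSq false l := by
  fun_induction pvCollapseLoop l with
  | case1 l h ih =>
    rw [ih, pvRep_replace, pvSq_pvRep]
  | case2 l h =>
    have : ¬ (['-', '-'] <:+: l) := fun hinf => h ((PySem.Chars.isIn_iff_infix _ _).mpr hinf)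
    exact ((pvSq_fix l this).1).symm

theorem pvFoldB (l : List Char) : ∀ (acc : List Char),
    (List.foldl (fun out c =>
        if c = '/' ∨ c = '.' ∨ c = ' ' ∨ c = '_' ∨ c = '-' then
          if out.head? = some '-' then out else '-' :: out
        else c :: out) acc l).reverse
      = acc.reverse ++ pvSq (decide (acc.head? = some '-')) (l.map pvF) := by
  induction l with
  | nil => intro acc; simp [pvSq]
  | cons c t ih =>
    intro acc
    by_cases hc : c = '/' ∨ c = '.' ∨ c = ' ' ∨ c = '_' ∨ c = '-'
    · have hfc : pvF c = '-' := by
        rcases hc with h | h | h | h | h <;> simp [pvF, h]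
      by_cases hacc : acc.head? = some '-'
      · simp [List.foldl_cons, if_pos hc, if_pos hacc, ih, hfc, pvSq, hacc]
      · simp [List.foldl_cons, if_pos hc, if_neg hacc, ih, hfc, pvSq, hacc]
    · have hfc : pvF c = c := by
        push_neg at hc
        simp [pvF, hc.1, hc.2.1, hc.2.2.1, hc.2.2.2.1]
      have hcd : c ≠ '-' := by push_neg at hc; exact hc.2.2.2.2
      have hc4 : ¬ (c = '/' ∨ c = '.' ∨ c = ' ' ∨ c = '_') := by tauto
      simp [List.foldl_cons, if_neg hc, if_neg hc4, ih, hfc, pvSq, hcd]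

-- ===== VERDICT (by name: the statement is the Claim_ definition above) =====
theorem derive_vector_name_spec : Claim_equal_derive_vector_name := by
  unfold Claim_equal_derive_vector_name
  intro s _
  unfold Spec_derive_vector_name
  simp only [derive_vector_name, derive_vector_name_alt]
  split_ifs with h1 h2
  · rfl
  · rfl
  · rw [pvMapChain, pvCollapse_eq, pvFoldB]
    simp
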